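-- pv_equiv track=rewrite | github.com/AIn0n/advent_of_code_23 | 2025/7day/task1.py | solution
-- ===== SOURCE A (Python) =====
-- def solution(rows: list[str]) -> int:
--     beams_pos = set([rows[0].find("S")])
--     splits = 0
--     for row in rows[1:]:
--         new_beams_pos = set()
--         for idx in range(len(row)):
--             if row[idx] != "^":
--                 continue
--             if idx in beams_pos:
--                 splits += 1
--                 new_beams_pos.add(idx - 1)
--                 new_beams_pos.add(idx + 1)
--                 beams_pos.remove(idx)
--         beams_pos.update(new_beams_pos)
--
--     return splits
-- ===== SOURCE B (Python) =====
-- def solution(rows: list[str]) -> int: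
--     beams = {rows[0].find("S")}
--     splits = 0
--     for row in rows[1:]:
--         n = len(row)
--         hit = [p for p in beams if 0 <= p < n and row[p] == "^"]
--         splits += len(hit)
--         beams.difference_update(hit)
--         for p in hit:
--             beams.add(p - 1)
--             beams.add(p + 1)
--     return splits
-- ===== Notes on version B (the rewrite author's own statement) =====
-- stated objective: alternative
-- what changed: B iterates over the current beam-position set, collecting the hit positions with one filter and splicing in their neighbours, instead of A's scan over every column of every row with in-place set mutation.
import Mathlib
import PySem

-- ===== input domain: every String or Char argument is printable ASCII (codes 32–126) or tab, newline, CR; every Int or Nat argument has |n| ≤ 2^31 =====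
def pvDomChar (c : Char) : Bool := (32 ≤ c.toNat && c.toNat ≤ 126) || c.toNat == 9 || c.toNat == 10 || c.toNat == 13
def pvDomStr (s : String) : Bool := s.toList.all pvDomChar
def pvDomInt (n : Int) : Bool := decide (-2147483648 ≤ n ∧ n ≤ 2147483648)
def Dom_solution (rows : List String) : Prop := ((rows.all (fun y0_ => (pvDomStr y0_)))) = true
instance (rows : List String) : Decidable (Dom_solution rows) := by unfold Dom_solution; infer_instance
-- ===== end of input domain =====

-- B iterates over the current beam positions instead of scanning every column of every row; same result.

-- ===== PORT A =====
-- one row of A: inner loop over range(len(row)) with state (splits, new_beams_pos, beams_pos);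
-- Python's beams_pos.remove(idx) is guarded by 'idx in beams_pos', so it never raises: Set.discard is exact there.
def solutionRowA (st : Int × PySem.Set Int) (row : String) : Int × PySem.Set Int :=
  let r := (PySem.List.pyRange 0 (PySem.Str.len row) 1).foldl
    (fun (s : Int × PySem.Set Int × PySem.Set Int) idx =>
      if PySem.Str.pyGet? row idx ≠ some '^' then s
      else if PySem.Set.contains s.2.2 idx then
        (s.1 + 1, PySem.Set.add (PySem.Set.add s.2.1 (idx - 1)) (idx + 1), PySem.Set.discard s.2.2 idx)
      else s)
    (st.1, (PySem.Set.empty, st.2))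
  (r.1, PySem.Set.update r.2.2 r.2.1)

def solution (rows : List String) : Int :=
  match PySem.List.pyGet? rows 0 with
  | none => 0   -- Python raises IndexError on []; excluded by Pre_solution
  | some r0 =>
    ((PySem.List.slice rows (some 1) none).foldl solutionRowA
      (0, PySem.Set.ofList [PySem.Str.find r0 "S"])).1

-- ===== PORT B =====
-- one row of B: filter the beam set for hits, count them, splice in the neighbours
def solutionRowB (st : Int × PySem.Set Int) (row : String) : Int × PySem.Set Int :=
  let n : Int := PySem.Str.len row
  let hit := st.2.filter (fun p => decide (0 ≤ p) && decide (p < n) && (PySem.Str.pyGet? row p == some '^'))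
  let beams := hit.foldl (fun b p => PySem.Set.add (PySem.Set.add b (p - 1)) (p + 1)) (PySem.Set.diff st.2 hit)
  (st.1 + hit.length, beams)

def solution_alt (rows : List String) : Int :=
  match PySem.List.pyGet? rows 0 with
  | none => 0   -- B also indexes rows[0]; excluded by Pre_solution
  | some r0 =>
    ((PySem.List.slice rows (some 1) none).foldl solutionRowB
      (0, PySem.Set.ofList [PySem.Str.find r0 "S"])).1

-- ===== PRECONDITION & SPEC =====
-- A evaluates rows[0], which raises IndexError on the empty list; the claim covers all rows ≠ [].
def Pre_solution (rows : List String) : Prop := rows ≠ []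
instance (rows : List String) : Decidable (Pre_solution rows) := by unfold Pre_solution; infer_instance
def pvWitness_solution : List String := ["S..", ".^.", "^.^"]

def Spec_solution (rows : List String) (out : Int) : Prop := out = solution_alt rows
instance (rows : List String) (out : Int) : Decidable (Spec_solution rows out) := by unfold Spec_solution; infer_instance

-- ===== CLAIM (what is proved, stated in full; the proofs are below) =====
def Claim_equal_solution : Prop := ∀ (rows : List String), Dom_solution rows → Pre_solution rows → Spec_solution rows (solution rows)

-- ===== LEMMAS AND PROOFS =====

def pvHit (row : String) (bm : PySem.Set Int) (i : Int) : Bool :=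
  (PySem.Str.pyGet? row i == some '^') && PySem.Set.contains bm i

theorem pvHit_discard (row : String) (bm : PySem.Set Int) (i j : Int) (hne : j ≠ i) :
    pvHit row (PySem.Set.discard bm i) j = pvHit row bm j := by
  simp [pvHit, PySem.Set.contains, PySem.Set.discard, hne]

theorem pvFoldAdd (hit : List Int) : ∀ (b0 : PySem.Set Int), b0.Nodup →
    (∀ x : Int, x ∈ hit.foldl (fun b p => PySem.Set.add (PySem.Set.add b (p - 1)) (p + 1)) b0 ↔
      x ∈ b0 ∨ ∃ p ∈ hit, x = p - 1 ∨ x = p + 1) ∧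
    (hit.foldl (fun b p => PySem.Set.add (PySem.Set.add b (p - 1)) (p + 1)) b0).Nodup := by
  induction hit with
  | nil => intro b0 h; simpa using h
  | cons p ps ih =>
    intro b0 h
    have h1 : (PySem.Set.add (PySem.Set.add b0 (p-1)) (p+1)).Nodup :=
      PySem.Set.nodup_add _ _ (PySem.Set.nodup_add _ _ h)
    obtain ⟨hm, hn⟩ := ih _ h1
    refine ⟨fun x => ?_, by simpa using hn⟩
    simp only [List.foldl_cons]
    rw [hm x]
    simp only [PySem.Set.mem_add, List.mem_cons]
    constructor
    · rintro (((h|h)|h)|⟨q,hq,h⟩)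
      · exact Or.inl h
      · exact Or.inr ⟨p, Or.inl rfl, Or.inl h⟩
      · exact Or.inr ⟨p, Or.inl rfl, Or.inr h⟩
      · exact Or.inr ⟨q, Or.inr hq, h⟩
    · rintro (h|⟨q,(rfl|hq),h⟩)
      · exact Or.inl (Or.inl (Or.inl h))
      · rcases h with h|h
        · exact Or.inl (Or.inl (Or.inr h))
        · exact Or.inl (Or.inr h)
      · exact Or.inr ⟨q, hq, h⟩

theorem pvHit_iff (row : String) (bm : PySem.Set Int) (i : Int) :
    pvHit row bm i = true ↔ PySem.Str.pyGet? row i = some '^' ∧ i ∈ bm := by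
  simp [pvHit, PySem.Set.contains]

theorem pvRowA_inner (row : String) (l : List Int) (hnd : l.Nodup) :
    ∀ (s : Int) (nw bm : PySem.Set Int), nw.Nodup → bm.Nodup →
    let r := l.foldl
      (fun (s : Int × PySem.Set Int × PySem.Set Int) idx =>
        if PySem.Str.pyGet? row idx ≠ some '^' then s
        else if PySem.Set.contains s.2.2 idx then
          (s.1 + 1, PySem.Set.add (PySem.Set.add s.2.1 (idx - 1)) (idx + 1), PySem.Set.discard s.2.2 idx)
        else s)
      (s, (nw, bm))
    r.1 = s + (l.filter (fun i => pvHit row bm i)).length ∧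
    (∀ x : Int, x ∈ r.2.1 ↔ x ∈ nw ∨ ∃ i ∈ l, pvHit row bm i = true ∧ (x = i - 1 ∨ x = i + 1)) ∧
    (∀ x : Int, x ∈ r.2.2 ↔ x ∈ bm ∧ ¬(x ∈ l ∧ pvHit row bm x = true)) ∧
    r.2.1.Nodup ∧ r.2.2.Nodup := by
  induction l with
  | nil => intro s nw bm hnw hbm; simp [*]
  | cons i rest ih =>
    intro s nw bm hnw hbm
    have hi : i ∉ rest := (List.nodup_cons.mp hnd).1
    have hrest : rest.Nodup := (List.nodup_cons.mp hnd).2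
    simp only [List.foldl_cons]
    by_cases hh : pvHit row bm i = true
    · obtain ⟨hc0, hm⟩ := (pvHit_iff row bm i).1 hh
      have hc : PySem.List.pyGet? row.toList i = some '^' := by simpa using hc0
      have hred : (if PySem.Str.pyGet? row i ≠ some '^' then (s, (nw, bm))
          else if PySem.Set.contains (s, (nw, bm)).2.2 i then
            ((s, (nw, bm)).1 + 1, PySem.Set.add (PySem.Set.add (s, (nw, bm)).2.1 (i - 1)) (i + 1), PySem.Set.discard (s, (nw, bm)).2.2 i)
          else (s, (nw, bm))) = (s + 1, (PySem.Set.add (PySem.Set.add nw (i - 1)) (i + 1), PySem.Set.discard bm i)) := by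
        simp [hc, PySem.Set.contains, hm]
      rw [hred]
      have hdisc : ∀ j ∈ rest, pvHit row (PySem.Set.discard bm i) j = pvHit row bm j :=
        fun j hj => pvHit_discard row bm i j (fun e => hi (e ▸ hj))
      obtain ⟨ih1, ih2, ih3, ih4, ih5⟩ := ih hrest (s + 1)
        (PySem.Set.add (PySem.Set.add nw (i - 1)) (i + 1)) (PySem.Set.discard bm i)
        (PySem.Set.nodup_add _ _ (PySem.Set.nodup_add _ _ hnw))
        (PySem.Set.nodup_discard _ _ hbm)
      have hfilter : rest.filter (fun j => pvHit row (PySem.Set.discard bm i) j)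
          = rest.filter (fun j => pvHit row bm j) := List.filter_congr hdisc
      refine ⟨?_, ?_, ?_, ih4, ih5⟩
      · rw [ih1, hfilter, List.filter_cons_of_pos hh, List.length_cons]
        push_cast; ring
      · intro x
        rw [ih2 x]
        simp only [PySem.Set.mem_add, List.mem_cons]
        constructor
        · rintro (((h|h)|h)|⟨j,hj,hp,hx⟩)
          · exact Or.inl h
          · exact Or.inr ⟨i, Or.inl rfl, hh, Or.inl h⟩
          · exact Or.inr ⟨i, Or.inl rfl, hh, Or.inr h⟩
          · exact Or.inr ⟨j, Or.inr hj, (hdisc j hj) ▸ hp, hx⟩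
        · rintro (h|⟨j,(rfl|hj),hp,hx⟩)
          · exact Or.inl (Or.inl (Or.inl h))
          · rcases hx with h|h
            · exact Or.inl (Or.inl (Or.inr h))
            · exact Or.inl (Or.inr h)
          · exact Or.inr ⟨j, hj, (hdisc j hj) ▸ hp, hx⟩
      · intro x
        rw [ih3 x]
        simp only [PySem.Set.mem_discard, List.mem_cons]
        by_cases hx : x = i
        · subst hx; simp [hh, hm]
        · by_cases hr : x ∈ rest
          · rw [hdisc x hr]; tauto
          · tauto
    · have hred : (if PySem.Str.pyGet? row i ≠ some '^' then (s, (nw, bm))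
          else if PySem.Set.contains (s, (nw, bm)).2.2 i then
            ((s, (nw, bm)).1 + 1, PySem.Set.add (PySem.Set.add (s, (nw, bm)).2.1 (i - 1)) (i + 1), PySem.Set.discard (s, (nw, bm)).2.2 i)
          else (s, (nw, bm))) = (s, (nw, bm)) := by
        by_cases hc : PySem.Str.pyGet? row i = some '^'
        · have hm : i ∉ bm := fun hmem => hh ((pvHit_iff row bm i).2 ⟨hc, hmem⟩)
          have hc' : PySem.List.pyGet? row.toList i = some '^' := by simpa using hc
          simp [hc', PySem.Set.contains, hm]
        · have hc' : ¬ PySem.List.pyGet? row.toList i = some '^' := by simpa using hc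
          simp [hc']
      rw [hred]
      obtain ⟨ih1, ih2, ih3, ih4, ih5⟩ := ih hrest s nw bm hnw hbm
      refine ⟨?_, ?_, ?_, ih4, ih5⟩
      · rw [ih1, List.filter_cons_of_neg (by simpa using hh)]
      · intro x
        rw [ih2 x]
        simp only [List.mem_cons]
        constructor
        · rintro (h|⟨j,hj,hp,hx⟩)
          · exact Or.inl h
          · exact Or.inr ⟨j, Or.inr hj, hp, hx⟩
        · rintro (h|⟨j,(rfl|hj),hp,hx⟩)
          · exact Or.inl h
          · exact absurd hp hh
          · exact Or.inr ⟨j, hj, hp, hx⟩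
      · intro x
        rw [ih3 x]
        simp only [List.mem_cons]
        by_cases hx : x = i
        · subst hx; simp [hh]
        · tauto



def pvRel (a b : Int × PySem.Set Int) : Prop :=
  a.1 = b.1 ∧ a.2.Nodup ∧ b.2.Nodup ∧ ∀ x : Int, x ∈ a.2 ↔ x ∈ b.2

theorem pvRow_rel (a b : Int × PySem.Set Int) (row : String) (h : pvRel a b) :
    pvRel (solutionRowA a row) (solutionRowB b row) := by
  obtain ⟨h1, hna, hnb, hmem⟩ := h
  unfold solutionRowA solutionRowB
  obtain ⟨i1, i2, i3, i4, i5⟩ := pvRowA_inner row (PySem.List.pyRange 0 (PySem.Str.len row) 1)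
    (PySem.List.nodup_pyRange_one 0 (PySem.Str.len row))
    a.1 PySem.Set.empty a.2 List.nodup_nil hna
  set hit := b.2.filter (fun p => decide (0 ≤ p) && decide (p < (PySem.Str.len row : Int)) && (PySem.Str.pyGet? row p == some '^')) with hhitdef
  have hhit : ∀ x : Int, x ∈ hit ↔ x ∈ PySem.List.pyRange 0 (PySem.Str.len row) 1 ∧ pvHit row a.2 x = true := by
    intro x
    rw [hhitdef, List.mem_filter, PySem.List.mem_pyRange_one, pvHit_iff]
    constructor
    · rintro ⟨hx, hq⟩
      simp only [Bool.and_eq_true, decide_eq_true_eq, beq_iff_eq] at hq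
      exact ⟨⟨hq.1.1, hq.1.2⟩, hq.2, (hmem x).2 hx⟩
    · rintro ⟨⟨hl, hr⟩, hg, hma⟩
      refine ⟨(hmem x).1 hma, ?_⟩
      simp only [Bool.and_eq_true, decide_eq_true_eq, beq_iff_eq]
      exact ⟨⟨hl, hr⟩, hg⟩
  have hhitnd : hit.Nodup := hnb.filter _
  have hand : List.Perm ((PySem.List.pyRange 0 (PySem.Str.len row) 1).filter (fun i => pvHit row a.2 i)) hit := by
    refine (List.perm_ext_iff_of_nodup ((PySem.List.nodup_pyRange_one 0 _).filter _) hhitnd).2 ?_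
    intro x
    rw [List.mem_filter, hhit x]
  obtain ⟨fm, fn⟩ := pvFoldAdd hit (PySem.Set.diff b.2 hit) (PySem.Set.nodup_diff _ _ hnb)
  refine ⟨?_, ?_, fn, ?_⟩
  · rw [i1, h1, hand.length_eq]
  · exact PySem.Set.nodup_update _ _ i5
  · intro x
    simp only [PySem.Set.mem_update]
    rw [i2 x, i3 x, fm x]
    simp only [PySem.Set.mem_diff]
    constructor
    · rintro (⟨hba, hnh⟩ | (h0 | ⟨j, hj, hp, hx⟩))
      · exact Or.inl ⟨(hmem x).1 hba, fun hc => hnh ((hhit x).1 hc)⟩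
      · exact absurd h0 (List.not_mem_nil)
      · exact Or.inr ⟨j, (hhit j).2 ⟨hj, hp⟩, hx⟩
    · rintro (⟨hbb, hnh⟩ | ⟨j, hj, hx⟩)
      · exact Or.inl ⟨(hmem x).2 hbb, fun hc => hnh ((hhit x).2 hc)⟩
      · obtain ⟨hj1, hj2⟩ := (hhit j).1 hj
        exact Or.inr (Or.inr ⟨j, hj1, hj2, hx⟩)

theorem pvFold_rel (rs : List String) (a b : Int × PySem.Set Int) (h : pvRel a b) :
    pvRel (rs.foldl solutionRowA a) (rs.foldl solutionRowB b) := by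
  induction rs generalizing a b with
  | nil => exact h
  | cons r rs ih => exact ih _ _ (pvRow_rel a b r h)

-- ===== VERDICT (by name: the statement is the Claim_ definition above) =====
theorem solution_spec : Claim_equal_solution := by
  intro rows _ hpre
  unfold Spec_solution solution solution_alt
  match rows with
  | [] => exact absurd rfl hpre
  | r0 :: rest =>
    have hget : PySem.List.pyGet? (r0 :: rest) 0 = some r0 := by
      simp [PySem.List.pyGet?, PySem.List.pyIdx?]
    rw [hget]
    have hrel : pvRel (0, PySem.Set.ofList [PySem.Str.find r0 "S"])
        (0, PySem.Set.ofList [PySem.Str.find r0 "S"]) :=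
      ⟨rfl, PySem.Set.nodup_ofList _, PySem.Set.nodup_ofList _, fun _ => Iff.rfl⟩
    exact (pvFold_rel _ _ _ hrel).1
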